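-- pv_equiv track=rewrite | github.com/ViniciusBessa/criptografias | lib_gui/codificadores.py | cod_autokey
-- ===== SOURCE A (Python) =====
-- from string import ascii_uppercase
--
-- def cod_autokey(mensagem: str, chave: str):
--     """Função para codificar em autokey cipher"""
--     alfabeto: list = list(ascii_uppercase)
--
--     mensagem: list = [x.upper() for x in mensagem]
--     chave: list = [x.upper() for x in chave]
--
--     for letra in [x for x in mensagem if x in alfabeto]:
--         if len(chave) < len([x for x in mensagem if x in alfabeto]):
--             chave.append(letra)
--         else:
--             break
--     carac_esp: list = [[indice, x] for indice, x in enumerate(mensagem) if x not in alfabeto]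
--     mensagem: list = [x for x in mensagem if x in alfabeto]
--     for indice, letra in enumerate(mensagem):
--         novo_alfabeto: list = alfabeto[alfabeto.index(chave[indice])::]
--         novo_alfabeto.extend(alfabeto[0:alfabeto.index(chave[indice]):])
--         mensagem[indice] = novo_alfabeto[alfabeto.index(letra)]
--     for carac in carac_esp:
--         mensagem.insert(carac[0], carac[1])
--     return ''.join(mensagem)
-- ===== SOURCE B (Python) =====
-- from string import ascii_uppercase
--
-- def cod_autokey(mensagem: str, chave: str):
--     """Autokey cipher, single pass: keystream = key + message letters, counter over it."""
--     msg = mensagem.upper()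
--     keystream = list(chave.upper()) + [c for c in msg if c in ascii_uppercase]
--     out = []
--     k = 0
--     for c in msg:
--         if c in ascii_uppercase:
--             out.append(ascii_uppercase[(ascii_uppercase.index(c)
--                                         + ascii_uppercase.index(keystream[k])) % 26])
--             k += 1
--         else:
--             out.append(c)
--     return ''.join(out)
-- ===== Notes on version B (the rewrite author's own statement) =====
-- stated objective: faster
-- what changed: B builds the keystream once (key + message letters) and encodes in a single pass over the message with a keystream counter, instead of A's scheme of re-counting the letters inside the key-extension loop, extracting the letters, rotating a fresh alphabet copy per letter and re-inserting every special character by list.insert.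
import Mathlib
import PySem

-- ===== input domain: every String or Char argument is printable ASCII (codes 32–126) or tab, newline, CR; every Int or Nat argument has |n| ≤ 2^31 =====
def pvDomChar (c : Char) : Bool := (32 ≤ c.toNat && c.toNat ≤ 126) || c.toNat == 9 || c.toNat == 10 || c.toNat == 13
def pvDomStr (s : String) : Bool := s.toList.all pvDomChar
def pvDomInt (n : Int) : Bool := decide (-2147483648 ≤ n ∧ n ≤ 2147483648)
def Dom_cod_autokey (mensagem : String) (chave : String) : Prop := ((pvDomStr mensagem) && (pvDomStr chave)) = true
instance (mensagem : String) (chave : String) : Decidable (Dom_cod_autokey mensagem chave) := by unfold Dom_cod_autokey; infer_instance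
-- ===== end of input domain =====

-- B encodes in ONE pass over the message with a keystream counter (keystream built once as
-- key + message letters), instead of A's extract-letters / encode / reinsert-specials scheme.

-- ===== PORT A =====
def pvAlf : List Char := "ABCDEFGHIJKLMNOPQRSTUVWXYZ".toList

-- A's body of the encoding loop: novo_alfabeto = alfabeto[ki::] + alfabeto[0:ki:],
-- result = novo_alfabeto[alfabeto.index(letra)].  index? = none is exactly where Python's
-- list.index raises ValueError (those inputs are excluded by Pre_); .getD 0 makes it total.
def pvRotA (kc : Char) (letra : Char) : Char :=
  let ki : Nat := (PySem.List.index? pvAlf kc).getD 0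
  let novo := PySem.List.slice pvAlf (some (ki : Int)) none ++
              PySem.List.slice pvAlf (some 0) (some (ki : Int))
  novo.getD ((PySem.List.index? pvAlf letra).getD 0) 'A'

-- A's first loop: append letters to chave until len(chave) reaches the letter count, then break.
def pvExtendKey : List Char → List Char → Nat → List Char
  | [], ch, _ => ch
  | l :: ls, ch, n => if ch.length < n then pvExtendKey ls (ch ++ [l]) n else ch

def cod_autokey (mensagem : String) (chave : String) : String :=
  let msg := mensagem.toList.map PySem.Chars.upperChar
  let ch := chave.toList.map PySem.Chars.upperChar
  let msgAl := msg.filter (fun x => pvAlf.contains x)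
  let ch2 := pvExtendKey msgAl ch msgAl.length
  let caracEsp := (PySem.List.enumerate msg).filter (fun p => !(pvAlf.contains p.2))
  let enc := (PySem.List.enumerate msgAl).map (fun p => pvRotA (PySem.List.pyGetD ch2 p.1 'A') p.2)
  let res := caracEsp.foldl (fun acc p => PySem.List.insert acc p.1 p.2) enc
  String.ofList res

-- ===== PORT B =====
-- B's cipher formula: ascii_uppercase[(index(letra) + index(kc)) % 26]
def pvRotB (kc : Char) (letra : Char) : Char :=
  pvAlf.getD (((PySem.List.index? pvAlf letra).getD 0 + (PySem.List.index? pvAlf kc).getD 0) % 26) 'A'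

-- B's single pass with the keystream counter k
def pvGo (ks : List Char) : List Char → Nat → List Char
  | [], _ => []
  | c :: cs, k =>
    if pvAlf.contains c then pvRotB (ks.getD k 'A') c :: pvGo ks cs (k + 1)
    else c :: pvGo ks cs k

def cod_autokey_alt (mensagem : String) (chave : String) : String :=
  let msg := (PySem.Str.upper mensagem).toList
  let ks := (PySem.Str.upper chave).toList ++ msg.filter (fun x => pvAlf.contains x)
  String.ofList (pvGo ks msg 0)

-- ===== PRECONDITION & SPEC =====
-- Pre_ excludes exactly the inputs on which A raises ValueError (list.index of a char not in the
-- alphabet): a non-alphabetic character among the key positions actually used, i.e. the first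
-- min(len(chave), number-of-letters-of-mensagem) positions.  B raises ValueError there too.
def Pre_cod_autokey (mensagem : String) (chave : String) : Prop :=
  (((PySem.Str.upper chave).toList.take
      (((PySem.Str.upper mensagem).toList.filter
        (fun x => "ABCDEFGHIJKLMNOPQRSTUVWXYZ".toList.contains x)).length)).all
    (fun c => "ABCDEFGHIJKLMNOPQRSTUVWXYZ".toList.contains c)) = true
instance (mensagem : String) (chave : String) : Decidable (Pre_cod_autokey mensagem chave) := by
  unfold Pre_cod_autokey; infer_instance

def pvWitness_cod_autokey : String × String := ("Hi, there!", "key")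

def Spec_cod_autokey (mensagem : String) (chave : String) (out : String) : Prop := out = cod_autokey_alt mensagem chave
instance (mensagem : String) (chave : String) (out : String) : Decidable (Spec_cod_autokey mensagem chave out) := by unfold Spec_cod_autokey; infer_instance

-- ===== CLAIM (what is proved, stated in full; the proofs are below) =====
def Claim_equal_cod_autokey : Prop := ∀ (mensagem : String) (chave : String), Dom_cod_autokey mensagem chave → Pre_cod_autokey mensagem chave → Spec_cod_autokey mensagem chave (cod_autokey mensagem chave)

-- ===== LEMMAS AND PROOFS =====

-- rotating a list by k and indexing at i is indexing at (i + k) mod length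
theorem pv_rot_list {α : Type} (l : List α) (d : α) (k i : Nat)
    (hk : k < l.length) (hi : i < l.length) :
    (l.drop k ++ l.take k).getD i d = l.getD ((i + k) % l.length) d := by
  simp only [List.getD_eq_getElem?_getD]
  by_cases h : i < l.length - k
  · rw [List.getElem?_append_left (by rw [List.length_drop]; omega),
      List.getElem?_drop, Nat.mod_eq_of_lt (by omega), Nat.add_comm]
  · have hm : (i + k) % l.length = i - (l.length - k) := by
      have he : i + k - l.length = i - (l.length - k) := by omega
      rw [Nat.mod_eq_sub_mod (by omega), Nat.mod_eq_of_lt (by omega), he]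
    rw [List.getElem?_append_right (by rw [List.length_drop]; omega), List.length_drop,
      List.getElem?_take_of_lt (by omega), hm]

-- the two per-letter formulas agree on alphabet letters
theorem pvRot_eq : ∀ kc ∈ pvAlf, ∀ letra ∈ pvAlf, pvRotA kc letra = pvRotB kc letra := by
  intro kc hkc letra hl
  obtain ⟨ki, hki⟩ := Option.isSome_iff_exists.mp ((PySem.List.index?_isSome_iff pvAlf kc).mpr hkc)
  obtain ⟨li, hli⟩ := Option.isSome_iff_exists.mp ((PySem.List.index?_isSome_iff pvAlf letra).mpr hl)
  obtain ⟨hkilt, -, -⟩ := PySem.List.getElem_of_index?_eq_some hki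
  obtain ⟨hlilt, -, -⟩ := PySem.List.getElem_of_index?_eq_some hli
  unfold pvRotA pvRotB
  rw [hki, hli]
  simp only [Option.getD_some]
  rw [PySem.List.slice_from_natCast, PySem.List.slice_zero_start, PySem.List.slice_to_natCast]
  have h26 : pvAlf.length = 26 := rfl
  rw [show (26 : Nat) = pvAlf.length from h26.symm]
  exact pv_rot_list pvAlf 'A' ki li hkilt hlilt

-- A's key-extension loop is 'key ++ first (n - len key) letters'
theorem pvExtendKey_eq (ls : List Char) (ch : List Char) (n : Nat) :
    pvExtendKey ls ch n = ch ++ ls.take (n - ch.length) := by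
  induction ls generalizing ch with
  | nil => simp [pvExtendKey]
  | cons l ls ih =>
    by_cases h : ch.length < n
    · rw [pvExtendKey, if_pos h, ih]
      have h2 : n - ch.length = (n - (ch ++ [l]).length) + 1 := by simp; omega
      rw [h2, List.take_succ_cons, List.append_assoc]
      rfl
    · have h0 : n - ch.length = 0 := by omega
      rw [pvExtendKey, if_neg h, h0]
      simp

-- the extended key and B's keystream agree at every used position
theorem pv_key_agree (ch msgAl : List Char) (j : Nat) (hj : j < msgAl.length) :
    (ch ++ msgAl.take (msgAl.length - ch.length)).getD j 'A' = (ch ++ msgAl).getD j 'A' := by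
  by_cases h : j < ch.length
  · simp [List.getD, List.getElem?_append_left h]
  · push_neg at h
    simp only [List.getD, List.getElem?_append_right h]
    rw [List.getElem?_take_of_lt (by omega)]

-- every used keystream position holds an alphabet letter (from Pre_ and the filter)
theorem pv_key_mem (ch msgAl : List Char)
    (hch : ∀ c ∈ ch.take msgAl.length, pvAlf.contains c = true)
    (hal : ∀ c ∈ msgAl, pvAlf.contains c = true) (j : Nat) (hj : j < msgAl.length) :
    pvAlf.contains ((ch ++ msgAl).getD j 'A') = true := by
  by_cases h : j < ch.length
  · have hj' : j < (ch.take msgAl.length).length := by simp; omega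
    have hval : (ch ++ msgAl).getD j 'A' = (ch.take msgAl.length)[j] := by
      simp [List.getD, List.getElem?_append_left h, List.getElem?_eq_getElem h]
    rw [hval]; exact hch _ (List.getElem_mem hj')
  · push_neg at h
    have hj' : j - ch.length < msgAl.length := by omega
    have hval : (ch ++ msgAl).getD j 'A' = msgAl[j - ch.length] := by
      simp [List.getD, List.getElem?_append_right h, List.getElem?_eq_getElem hj']
    rw [hval]; exact hal _ (List.getElem_mem hj')

-- reference interleaving: walk the message, take the next encoded letter for letters,
-- keep specials in place
def pvMerge : List Char → List Char → List Char
  | [], _ => []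
  | c :: cs, E =>
    if pvAlf.contains c then E.headD c :: pvMerge cs E.tail else c :: pvMerge cs E

-- A's reinsertion loop over (index, special) pairs rebuilds exactly the interleaving
theorem pv_insert_merge (ms : List Char) (P E : List Char)
    (hE : E.length = (ms.filter (fun x => pvAlf.contains x)).length) :
    ((PySem.List.enumerate ms (P.length : Int)).filter (fun p => !(pvAlf.contains p.2))).foldl
        (fun acc p => PySem.List.insert acc p.1 p.2) (P ++ E)
    = P ++ pvMerge ms E := by
  induction ms generalizing P E with
  | nil =>
    have h0 : E = [] := List.length_eq_zero_iff.mp (by simpa using hE)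
    simp [pvMerge, h0]
  | cons c cs ih =>
    rw [PySem.List.enumerate_cons]
    by_cases hc : pvAlf.contains c = true
    · have hE' : E.length = (cs.filter (fun x => pvAlf.contains x)).length + 1 := by
        rw [hE, List.filter_cons_of_pos hc, List.length_cons]
      cases E with
      | nil => simp at hE'
      | cons e E' =>
        have hlen : E'.length = (cs.filter (fun x => pvAlf.contains x)).length := by
          simpa using hE'
        have h2 : P ++ e :: E' = (P ++ [e]) ++ E' := by simp
        have h1 : ((P.length : Int) + 1) = (((P ++ [e]).length : Nat) : Int) := by simp
        rw [List.filter_cons_of_neg (by simpa using hc), h2, h1, ih (P ++ [e]) E' hlen,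
          pvMerge, if_pos hc]
        simp
    · rw [List.filter_cons_of_pos (by simpa using hc), List.foldl_cons]
      have hins : PySem.List.insert (P ++ E) (P.length : Int) c = (P ++ [c]) ++ E := by
        rw [PySem.List.insert_natCast (P ++ E) P.length c (by simp)]
        simp
      have h1 : ((P.length : Int) + 1) = (((P ++ [c]).length : Nat) : Int) := by simp
      rw [hins, h1, ih (P ++ [c]) E (by rw [hE, List.filter_cons_of_neg hc]),
        pvMerge, if_neg hc]
      simp

-- the interleaving of A's encoded letters is B's single counting pass
theorem pv_merge_go (ch2 ks : List Char) (N : Nat)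
    (Hk : ∀ j : Nat, j < N →
      PySem.List.pyGetD ch2 (j : Int) 'A' = ks.getD j 'A' ∧
      pvAlf.contains (ks.getD j 'A') = true) :
    ∀ (ms : List Char) (k : Nat), k + (ms.filter (fun x => pvAlf.contains x)).length ≤ N →
    pvMerge ms ((PySem.List.enumerate (ms.filter (fun x => pvAlf.contains x)) (k : Int)).map
        (fun p => pvRotA (PySem.List.pyGetD ch2 p.1 'A') p.2))
    = pvGo ks ms k := by
  intro ms
  induction ms with
  | nil => intro k _; simp [pvMerge, pvGo]
  | cons c cs ih =>
    intro k hk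
    by_cases hc : pvAlf.contains c = true
    · have hk2 : k + ((cs.filter (fun x => pvAlf.contains x)).length + 1) ≤ N := by
        rw [List.filter_cons_of_pos hc, List.length_cons] at hk; exact hk
      rw [List.filter_cons_of_pos hc]
      obtain ⟨hkey, hmem⟩ := Hk k (by omega)
      rw [PySem.List.enumerate_cons, List.map_cons, pvMerge, if_pos hc]
      have hrot : pvRotA (PySem.List.pyGetD ch2 (k : Int) 'A') c = pvRotB (ks.getD k 'A') c := by
        rw [hkey]
        exact pvRot_eq _ (List.mem_of_elem_eq_true hmem) _ (List.mem_of_elem_eq_true hc)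
      have h1 : ((k : Int) + 1) = (((k + 1 : Nat)) : Int) := by push_cast; ring
      simp only [List.headD_cons, List.tail_cons, hrot, h1]
      rw [ih (k + 1) (by omega), pvGo, if_pos hc]
    · have hk2 : k + (cs.filter (fun x => pvAlf.contains x)).length ≤ N := by
        rw [List.filter_cons_of_neg hc] at hk; exact hk
      rw [List.filter_cons_of_neg hc, pvMerge, if_neg hc, ih k hk2, pvGo, if_neg hc]

-- the whole pipeline of A, on upper-cased lists, equals B's single pass
theorem pv_main (msg0 ch0 : List Char)
    (hpre : ∀ c ∈ ch0.take ((msg0.filter (fun x => pvAlf.contains x)).length),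
      pvAlf.contains c = true) :
    ((PySem.List.enumerate msg0).filter (fun p => !(pvAlf.contains p.2))).foldl
        (fun acc p => PySem.List.insert acc p.1 p.2)
        ((PySem.List.enumerate (msg0.filter (fun x => pvAlf.contains x))).map
          (fun p => pvRotA (PySem.List.pyGetD
            (pvExtendKey (msg0.filter (fun x => pvAlf.contains x)) ch0
              (msg0.filter (fun x => pvAlf.contains x)).length) p.1 'A') p.2))
    = pvGo (ch0 ++ msg0.filter (fun x => pvAlf.contains x)) msg0 0 := by
  have hE : ((PySem.List.enumerate (msg0.filter (fun x => pvAlf.contains x))).map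
      (fun p => pvRotA (PySem.List.pyGetD
        (pvExtendKey (msg0.filter (fun x => pvAlf.contains x)) ch0
          (msg0.filter (fun x => pvAlf.contains x)).length) p.1 'A') p.2)).length
      = (msg0.filter (fun x => pvAlf.contains x)).length := by
    simp [PySem.List.length_enumerate]
  have hfold := pv_insert_merge msg0 [] _ hE
  simp only [List.length_nil, Nat.cast_zero, List.nil_append] at hfold
  rw [hfold]
  have hal : ∀ c ∈ msg0.filter (fun x => pvAlf.contains x), pvAlf.contains c = true := by
    intro c hcmem; exact (List.mem_filter.mp hcmem).2
  have Hk : ∀ j : Nat, j < (msg0.filter (fun x => pvAlf.contains x)).length →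
      PySem.List.pyGetD (pvExtendKey (msg0.filter (fun x => pvAlf.contains x)) ch0
          (msg0.filter (fun x => pvAlf.contains x)).length) (j : Int) 'A'
        = (ch0 ++ msg0.filter (fun x => pvAlf.contains x)).getD j 'A' ∧
      pvAlf.contains ((ch0 ++ msg0.filter (fun x => pvAlf.contains x)).getD j 'A') = true := by
    intro j hj
    refine ⟨?_, pv_key_mem ch0 _ hpre hal j hj⟩
    rw [pvExtendKey_eq, PySem.List.pyGetD_natCast]
    exact pv_key_agree ch0 _ j hj
  have hgo := pv_merge_go _ _ _ Hk msg0 0 (by simp)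
  simp only [Nat.cast_zero] at hgo
  exact hgo

-- ===== VERDICT (by name: the statement is the Claim_ definition above) =====
theorem cod_autokey_spec : Claim_equal_cod_autokey := by
  intro mensagem chave _ hpre
  unfold Spec_cod_autokey cod_autokey cod_autokey_alt
  have hup : ∀ s : String, s.toList.map PySem.Chars.upperChar = (PySem.Str.upper s).toList := by
    intro s; rw [PySem.Str.toList_upper]; rfl
  rw [hup mensagem, hup chave]
  have hpre' := List.all_eq_true.mp hpre
  exact congrArg String.ofList
    (pv_main (PySem.Str.upper mensagem).toList (PySem.Str.upper chave).toList
      (fun c hc => hpre' c hc))
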